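-- pv_equiv track=rewrite | github.com/IoanMamsurov/modul_9_6 | modul_9_6.py | all_variants
-- ===== SOURCE A (Python) =====
-- from itertools import combinations
--
-- def all_variants(text):
--     a = []
--     for i in range(1, len(text)+1):
--         a = []
--         b = combinations(text, i)
--         a.extend(b)
--         for j in a:
--             j = list(j)
--             yield (''.join(j))
-- ===== SOURCE B (Python) =====
-- def all_variants(text):
--     # Explicit backtracking recursion over the remaining suffix instead of
--     # itertools.combinations; same increasing-index order, lengths ascending.
--     def build(chosen, suffix, k):
--         if len(chosen) == k:
--             yield ''.join(chosen)
--             return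
--         while suffix:
--             head, suffix = suffix[0], suffix[1:]
--             yield from build(chosen + [head], suffix, k)
--     for k in range(1, len(text) + 1):
--         yield from build([], list(text), k)
-- ===== Notes on version B (the rewrite author's own statement) =====
-- stated objective: alternative
-- what changed: Replaces the itertools.combinations library call with an explicit backtracking generator that extends a partial choice from the remaining suffix, reproducing the same lengths-ascending, increasing-index order.
import Mathlib
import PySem

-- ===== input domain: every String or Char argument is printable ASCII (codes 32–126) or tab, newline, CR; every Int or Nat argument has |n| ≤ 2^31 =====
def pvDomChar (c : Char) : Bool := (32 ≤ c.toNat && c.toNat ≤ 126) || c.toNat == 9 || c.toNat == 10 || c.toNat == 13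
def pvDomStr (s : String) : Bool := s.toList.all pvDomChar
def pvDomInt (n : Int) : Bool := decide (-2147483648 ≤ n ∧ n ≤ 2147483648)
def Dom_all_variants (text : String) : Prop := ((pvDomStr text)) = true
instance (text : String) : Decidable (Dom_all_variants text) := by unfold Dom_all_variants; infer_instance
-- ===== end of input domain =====

-- B replaces the itertools.combinations call with explicit backtracking recursion; same output order (alternative, not faster).

-- ===== PORT A =====
-- hand-port of itertools.combinations(text, k) over the character list, in
-- itertools' order (lexicographic by increasing index tuples)
def pvCombs (xs : List Char) (k : Nat) : List (List Char) :=
  match k, xs with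
  | 0, _ => [[]]
  | _ + 1, [] => []
  | k + 1, x :: rest => (pvCombs rest k).map (fun t => x :: t) ++ pvCombs rest (k + 1)

def all_variants (text : String) : List String :=
  let cs := text.toList
  (PySem.List.pyRange 1 (cs.length + 1) 1).flatMap
    (fun i => (pvCombs cs i.toNat).map (fun j => String.mk j))

-- ===== PORT B =====
-- build(chosen, suffix, k): emit join(chosen) once it has k chars, else the
-- while-loop peels heads off the suffix (first recursive call = loop body,
-- second = continuing the while loop with the shortened suffix)
def pvBuild (chosen : List Char) (suffix : List Char) (k : Nat) : List String :=
  if chosen.length = k then [String.mk chosen]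
  else
    match suffix with
    | [] => []
    | head :: rest => pvBuild (chosen ++ [head]) rest k ++ pvBuild chosen rest k

def all_variants_alt (text : String) : List String :=
  (PySem.List.pyRange 1 (text.length + 1) 1).flatMap
    (fun k => pvBuild [] text.toList k.toNat)

-- ===== PRECONDITION & SPEC =====
def Spec_all_variants (text : String) (out : List String) : Prop := out = all_variants_alt text
instance (text : String) (out : List String) : Decidable (Spec_all_variants text out) := by unfold Spec_all_variants; infer_instance

-- ===== CLAIM (what is proved, stated in full; the proofs are below) =====
def Claim_equal_all_variants : Prop := ∀ (text : String), Dom_all_variants text → Spec_all_variants text (all_variants text)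

-- ===== LEMMAS AND PROOFS =====

-- the backtracking helper enumerates exactly the combinations of the suffix,
-- each prefixed by the chosen characters, in the same order
theorem pvBuild_eq (suffix : List Char) : ∀ (chosen : List Char) (k : Nat),
    chosen.length ≤ k →
    pvBuild chosen suffix k
      = (pvCombs suffix (k - chosen.length)).map (fun t => String.mk (chosen ++ t)) := by
  induction suffix with
  | nil =>
    intro chosen k h
    by_cases hk : chosen.length = k
    · simp [pvBuild, hk, pvCombs]
    · have : ∃ m, k - chosen.length = m + 1 := ⟨k - chosen.length - 1, by omega⟩
      obtain ⟨m, hm⟩ := this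
      simp [pvBuild, hk, hm, pvCombs]
  | cons head rest ih =>
    intro chosen k h
    by_cases hk : chosen.length = k
    · simp [pvBuild, hk, pvCombs]
    · have hlt : chosen.length < k := lt_of_le_of_ne h hk
      have : ∃ m, k - chosen.length = m + 1 := ⟨k - chosen.length - 1, by omega⟩
      obtain ⟨m, hm⟩ := this
      have h1 : (chosen ++ [head]).length ≤ k := by simp; omega
      have h2 : k - (chosen ++ [head]).length = m := by simp; omega
      rw [pvBuild, if_neg hk]
      rw [ih (chosen ++ [head]) k h1, ih chosen k h]
      rw [hm, h2, pvCombs]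
      simp [Function.comp]

-- ===== VERDICT (by name: the statement is the Claim_ definition above) =====
theorem all_variants_spec : Claim_equal_all_variants := by
  intro text _
  unfold Spec_all_variants all_variants all_variants_alt
  have hlen : text.length = text.toList.length := by simp
  rw [hlen]
  apply List.flatMap_congr
  intro k _
  rw [pvBuild_eq text.toList [] k.toNat (Nat.zero_le _)]
  simp
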